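-- pv_equiv track=rewrite | github.com/ab39912/hw-manager | lab4.py | _two_balanced_chunks
-- ===== SOURCE A (Python) =====
-- from typing import List, Tuple, Dict
--
-- def _two_balanced_chunks(text: str) -> List[str]:
--     """
--     >>> CHUNKING STRATEGY (exactly TWO mini-docs per HTML file) <<<
--     Split near the midpoint by character count, but cut at a *paragraph boundary*
--     (double newline) closest to the middle so we avoid splitting sentences.
--
--     WHY this method?
--       - Deterministic & simple: consistently two chunks per doc.
--       - Balanced: similar sizes help retrieval.
--       - Paragraph-aware: cleaner snippets and better semantic coherence.
--
--     Fallback: if no clear paragraphs or very short text, do a naive 50/50 split.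
--     """
--     if not text:
--         return []
--     if text.count("\n\n") == 0 or len(text) < 400:
--         mid = len(text) // 2
--         return [text[:mid].strip(), text[mid:].strip()]
--
--     paragraphs = text.split("\n\n")
--     cum = 0
--     mids = []
--     for p in paragraphs:
--         cum += len(p) + 2  # +2 accounts for the removed '\n\n'
--         mids.append(cum)
--     target = len(text) // 2
--     cut_idx = min(range(len(mids)), key=lambda i: abs(mids[i] - target))
--     cut_pos = mids[cut_idx]
--     left, right = text[:cut_pos].strip(), text[cut_pos:].strip()
--     if not left or not right:
--         mid = len(text) // 2
--         left, right = text[:mid].strip(), text[mid:].strip()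
--     return [left, right]
-- ===== SOURCE B (Python) =====
-- def _two_balanced_chunks(text: str):
--     if not text:
--         return []
--     if text.count("\n\n") == 0 or len(text) < 400:
--         mid = len(text) // 2
--         return [text[:mid].strip(), text[mid:].strip()]
--     # Candidate cut positions are (start of each non-overlapping "\n\n") + 2,
--     # followed by len(text) + 2: a strictly increasing sequence.  So the one
--     # closest to the target is either the last candidate <= target or the
--     # first one > target (ties going to the earlier, i.e. the <= one).  Walk
--     # the separator occurrences with str.find and stop at the first candidate
--     # past the target -- no paragraph list and no argmin pass.
--     target = len(text) // 2
--     prev = None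
--     i = 0
--     while True:
--         j = text.find("\n\n", i)
--         b = (j + 2) if j != -1 else (len(text) + 2)
--         if b > target:
--             if prev is not None and target - prev <= b - target:
--                 cut_pos = prev
--             else:
--                 cut_pos = b
--             break
--         prev = b
--         i = j + 2
--     left, right = text[:cut_pos].strip(), text[cut_pos:].strip()
--     if not left or not right:
--         mid = len(text) // 2
--         left, right = text[:mid].strip(), text[mid:].strip()
--     return [left, right]
-- ===== Notes on version B (the rewrite author's own statement) =====
-- stated objective: alternative
-- what changed: B never splits the text into a paragraph list and never runs an argmin: it walks the non-overlapping blank-line separator occurrences with str.find, and because the candidate cut positions are strictly increasing it stops at the first candidate past the midpoint and picks between it and the previous one (ties to the earlier candidate, matching min's earliest-index rule).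
import Mathlib
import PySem

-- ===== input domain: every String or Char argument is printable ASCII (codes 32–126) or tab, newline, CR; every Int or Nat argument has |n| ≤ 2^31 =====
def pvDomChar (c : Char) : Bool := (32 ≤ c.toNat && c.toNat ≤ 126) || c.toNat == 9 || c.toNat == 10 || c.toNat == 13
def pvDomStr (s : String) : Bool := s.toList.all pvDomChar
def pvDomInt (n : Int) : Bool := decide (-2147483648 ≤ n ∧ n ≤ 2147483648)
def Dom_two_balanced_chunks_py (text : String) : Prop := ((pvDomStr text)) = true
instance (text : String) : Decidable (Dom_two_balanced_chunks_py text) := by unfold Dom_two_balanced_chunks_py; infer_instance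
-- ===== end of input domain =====

-- B replaces A's split-into-paragraphs + boundary-list + min(range, key=...) argmin by a
-- str.find walk over the separator occurrences that stops at the first cut past the midpoint
-- and picks between it and the previous one (objective: alternative).


-- ===== PORT A =====
def two_balanced_chunks_py (text : String) : List String :=
  if text = "" then []
  else if PySem.Str.count text "\n\n" = 0 ∨ PySem.Str.len text < 400 then
    let mid := PySem.Int.floordiv (PySem.Str.len text) 2
    [PySem.Str.strip (PySem.Str.slice text none (some mid)),
     PySem.Str.strip (PySem.Str.slice text (some mid) none)]
  else
    let paragraphs := (PySem.Str.split? text "\n\n").getD []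
    -- the 'cum/mids' loop: state (cum, mids)
    let st := paragraphs.foldl
      (fun (st : Int × List Int) p =>
        (st.1 + PySem.Str.len p + 2, st.2 ++ [st.1 + PySem.Str.len p + 2]))
      (0, [])
    let mids := st.2
    let target := PySem.Int.floordiv (PySem.Str.len text) 2
    -- min(range(len(mids)), key=lambda i: abs(mids[i]-target)); mids is never
    -- empty here, so Python's min never sees an empty range (.getD 0 unreachable)
    let cutIdx := (PySem.List.min? (PySem.List.pyRange 0 (mids.length : Int) 1)
        (fun i => |PySem.List.pyGetD mids i 0 - target|)).getD 0
    let cutPos := PySem.List.pyGetD mids cutIdx 0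
    let left := PySem.Str.strip (PySem.Str.slice text none (some cutPos))
    let right := PySem.Str.strip (PySem.Str.slice text (some cutPos) none)
    if left = "" ∨ right = "" then
      let mid := PySem.Int.floordiv (PySem.Str.len text) 2
      [PySem.Str.strip (PySem.Str.slice text none (some mid)),
       PySem.Str.strip (PySem.Str.slice text (some mid) none)]
    else [left, right]

-- ===== PORT B =====
-- B's while-loop: i walks the text via text.find("\n\n", i); candidate cut b is the
-- occurrence start + 2 (or len+2 when find fails); the loop breaks at the first b past
-- target and chooses between it and the previous candidate.  Python's i stays a
-- nonnegative index (i = j + 2 with j ≥ 0 in the looping branch, so j.toNat + 2 = j + 2);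
-- the fuel argument (started at len+1, more than the possible iterations, each of which
-- advances i by at least 2) only makes the same computation total in Lean.
def pvBFindLoop (text : String) (target : Int) : Nat → Option Int → Nat → Int
  | 0, prev, _ => prev.getD 0
  | fuel+1, prev, i =>
    let j := PySem.Str.findFrom text "\n\n" (i : Int)
    let b : Int := if j ≠ -1 then j + 2 else PySem.Str.len text + 2
    if target < b then
      match prev with
      | none => b
      | some p => if target - p ≤ b - target then p else b
    else pvBFindLoop text target fuel (some b) (j.toNat + 2)

def two_balanced_chunks_py_alt (text : String) : List String :=
  if text = "" then []
  else if PySem.Str.count text "\n\n" = 0 ∨ PySem.Str.len text < 400 then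
    let mid := PySem.Int.floordiv (PySem.Str.len text) 2
    [PySem.Str.strip (PySem.Str.slice text none (some mid)),
     PySem.Str.strip (PySem.Str.slice text (some mid) none)]
  else
    let target := PySem.Int.floordiv (PySem.Str.len text) 2
    let cutPos := pvBFindLoop text target (text.toList.length + 1) none 0
    let left := PySem.Str.strip (PySem.Str.slice text none (some cutPos))
    let right := PySem.Str.strip (PySem.Str.slice text (some cutPos) none)
    if left = "" ∨ right = "" then
      let mid := PySem.Int.floordiv (PySem.Str.len text) 2
      [PySem.Str.strip (PySem.Str.slice text none (some mid)),
       PySem.Str.strip (PySem.Str.slice text (some mid) none)]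
    else [left, right]

-- ===== PRECONDITION & SPEC =====
def Spec_two_balanced_chunks_py (text : String) (out : List String) : Prop := out = two_balanced_chunks_py_alt text
instance (text : String) (out : List String) : Decidable (Spec_two_balanced_chunks_py text out) := by unfold Spec_two_balanced_chunks_py; infer_instance

-- ===== CLAIM (what is proved, stated in full; the proofs are below) =====
def Claim_equal_two_balanced_chunks_py : Prop := ∀ (text : String), Dom_two_balanced_chunks_py text → Spec_two_balanced_chunks_py text (two_balanced_chunks_py text)

-- ===== LEMMAS AND PROOFS =====

-- running argmin step (proof gadget standing for "best candidate so far")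
def pvBestStep (t : Int) (b : Option (Int × Int)) (m : Int) : Option (Int × Int) :=
  match b with
  | none => some (|m - t|, m)
  | some b => if |m - t| < b.1 then some (|m - t|, m) else some b

-- A's boundary list, generated from a starting cumulative offset
def pvMids (c : Int) : List String → List Int
  | [] => []
  | p :: ps => (c + PySem.Str.len p + 2) :: pvMids (c + PySem.Str.len p + 2) ps

-- the same over character lists
def pvMidsC (c : Int) : List (List Char) → List Int
  | [] => []
  | p :: ps => (c + p.length + 2) :: pvMidsC (c + p.length + 2) ps

-- the separator
def pvSep : List Char := ['\n', '\n']

-- fuel-free form of PySem.Chars.splitOn.go for sep = pvSep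
def pvPieces : List Char → List Char → List (List Char)
  | [], cur => [cur.reverse]
  | c :: rest, cur =>
    if pvSep.isPrefixOf (c :: rest) then cur.reverse :: pvPieces ((c :: rest).drop 2) []
    else pvPieces rest (c :: cur)
  termination_by l _ => l.length
  decreasing_by all_goals simp

-- the boundary positions, read off the greedy non-overlapping find occurrences
def pvBnds (l : List Char) (base : Int) : List Int :=
  if PySem.Chars.find l pvSep = -1 then [base + l.length + 2]
  else (base + PySem.Chars.find l pvSep + 2) ::
    pvBnds (l.drop ((PySem.Chars.find l pvSep).toNat + 2))
      (base + PySem.Chars.find l pvSep + 2)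
  termination_by l.length
  decreasing_by
    rename_i h
    have h0 : 0 ≤ PySem.Chars.find l pvSep := by
      have := PySem.Chars.neg_one_le_find l pvSep; omega
    have hpre := (PySem.Chars.find_spec h0).1
    have hlen := hpre.length_le
    simp only [List.length_drop, List.length_drop] at *
    have : pvSep.length = 2 := rfl
    omega

-- B's selection rule over a boundary list (proof gadget; mirrors pvBFindLoop)
def pvNsel (t : Int) : Option Int → List Int → Int
  | prev, [] => prev.getD 0
  | prev, b :: bs =>
    if t < b then
      match prev with
      | none => b
      | some p => if t - p ≤ b - t then p else b
    else pvNsel t (some b) bs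

theorem pvNsel_cons (t : Int) (prev : Option Int) (b : Int) (bs : List Int) :
    pvNsel t prev (b :: bs)
      = if t < b then
          (match prev with
           | none => b
           | some p => if t - p ≤ b - t then p else b)
        else pvNsel t (some b) bs := rfl

-- A's (cum, mids) loop produces exactly pvMids
theorem pvFoldA_eq (ps : List String) (c : Int) (ms : List Int) :
    ps.foldl (fun (st : Int × List Int) p =>
        (st.1 + PySem.Str.len p + 2, st.2 ++ [st.1 + PySem.Str.len p + 2])) (c, ms)
      = (c + (ps.map PySem.Str.len).sum + 2 * ps.length, ms ++ pvMids c ps) := by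
  induction ps generalizing c ms with
  | nil => simp [pvMids]
  | cons x xs ih =>
    simp only [List.foldl_cons, ih, pvMids, List.map_cons, List.sum_cons, List.length_cons,
      List.append_assoc, List.singleton_append, Prod.mk.injEq]
    constructor
    · push_cast; ring
    · trivial

-- min? commutes with List.map (the step functions simulate each other)
theorem pvFoldMin_map {α β : Type} (f : α → β) (key : β → Int) (l : List α)
    (acc : Option α) :
    (l.foldl (fun acc x => match acc with
        | none => some x
        | some m => if key (f x) < key (f m) then some x else some m) acc).map f
      = (l.map f).foldl (fun acc y => match acc with
          | none => some y
          | some m => if key y < key m then some y else some m) (acc.map f) := by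
  induction l generalizing acc with
  | nil => rfl
  | cons x xs ih =>
    cases acc with
    | none => simp [ih]
    | some a =>
      by_cases h : key (f x) < key (f a) <;> simp [h, ih]

theorem pvMin?_map {α β : Type} (f : α → β) (key : β → Int) (l : List α) :
    PySem.List.min? (l.map f) key = (PySem.List.min? l (fun a => key (f a))).map f := by
  simp only [PySem.List.min?]
  exact (pvFoldMin_map f key l none).symm

theorem pvMap_getD_range {α : Type} (ms : List α) (d : α) :
    (List.range ms.length).map (fun k => ms.getD k d) = ms := by
  apply List.ext_getElem
  · simp
  · intro i h1 h2
    simp [List.getD_eq_getElem?_getD, List.getElem?_eq_getElem h2]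

-- the best-candidate fold is min? over the boundary values (paired with distance)
theorem pvBest_eq_min? (t : Int) (ms : List Int) :
    ms.foldl (pvBestStep t) none
      = (PySem.List.min? ms (fun a => |a - t|)).map (fun a => (|a - t|, a)) := by
  have h1 : ms.foldl (pvBestStep t) none
      = PySem.List.min? (ms.map (fun a => (|a - t|, a))) (fun p => p.1) := by
    simp only [PySem.List.min?, List.foldl_map]
    exact PySem.List.foldl_congr_mem ms _ _ none
      (by intro acc x _; cases acc <;> rfl)
  have h2 : PySem.List.min? (ms.map (fun a => (|a - t|, a))) (fun p : Int × Int => p.1)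
      = (PySem.List.min? ms (fun a => |a - t|)).map (fun a => (|a - t|, a)) := by
    rw [pvMin?_map]
  exact h1.trans h2

-- A's min-over-indices, read through the list, is min? over the values
theorem pvIdxMin_eq_min? (t : Int) (ms : List Int) :
    (PySem.List.min? (PySem.List.pyRange 0 (ms.length : Int) 1)
        (fun i => |PySem.List.pyGetD ms i 0 - t|)).map
        (fun i => PySem.List.pyGetD ms i 0)
      = PySem.List.min? ms (fun a => |a - t|) := by
  rw [PySem.List.pyRange_one]
  simp only [sub_zero, Int.toNat_natCast, zero_add]
  rw [pvMin?_map (fun k : Nat => (k : Int)) (fun i => |PySem.List.pyGetD ms i 0 - t|)]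
  rw [Option.map_map]
  have hc : ((fun i => PySem.List.pyGetD ms i 0) ∘ fun k : Nat => (k : Int))
      = fun k : Nat => ms.getD k 0 := by
    funext k; simp [PySem.List.pyGetD_natCast]
  have hk : (fun a : Nat => |PySem.List.pyGetD ms (a : Int) 0 - t|)
      = fun a : Nat => |(fun k : Nat => ms.getD k 0) a - t| := by
    funext k; simp [PySem.List.pyGetD_natCast]
  rw [hc, hk, ← pvMin?_map (fun k : Nat => ms.getD k 0) (fun a => |a - t|) (List.range ms.length)]
  rw [pvMap_getD_range]

-- A's cut position equals the best-candidate fold's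
theorem pvCut_eq (t : Int) (ms : List Int) :
    ((ms.foldl (pvBestStep t) none).map (fun b => b.2)).getD 0
      = PySem.List.pyGetD ms
          ((PySem.List.min? (PySem.List.pyRange 0 (ms.length : Int) 1)
            (fun i => |PySem.List.pyGetD ms i 0 - t|)).getD 0) 0 := by
  cases hO : PySem.List.min? (PySem.List.pyRange 0 (ms.length : Int) 1)
      (fun i => |PySem.List.pyGetD ms i 0 - t|) with
  | none =>
    have h2 := pvIdxMin_eq_min? t ms
    rw [hO] at h2
    have hnil : ms = [] := (PySem.List.min?_eq_none_iff ms _).mp h2.symm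
    subst hnil
    simp [PySem.List.pyGetD, PySem.List.pyGet?, PySem.List.pyIdx?]
  | some i =>
    have h2 := pvIdxMin_eq_min? t ms
    rw [hO] at h2
    rw [pvBest_eq_min? t ms, ← h2]
    simp

-- splitOn.go with enough fuel is pvPieces
theorem pvGo_eq_pieces (fuel : Nat) (l cur : List Char) (acc : List (List Char))
    (h : l.length < fuel) :
    PySem.Chars.splitOn.go pvSep fuel l cur acc = acc.reverse ++ pvPieces l cur := by
  induction fuel generalizing l cur acc with
  | zero => omega
  | succ fuel ih =>
    have hsl : pvSep.length = 2 := rfl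
    cases l with
    | nil =>
      rw [PySem.Chars.splitOn.go, pvPieces]
      · simp
      · simp
    | cons c rest =>
      rw [PySem.Chars.splitOn.go, pvPieces]
      by_cases hp : pvSep.isPrefixOf (c :: rest)
      · rw [if_pos hp, if_pos hp, ih]
        · simp [hsl]
        · simp [hsl] at h ⊢; omega
      · rw [if_neg hp, if_neg hp, ih]
        simp at h ⊢; omega

-- no occurrence anywhere → a single piece
theorem pvPieces_no_occ (l cur : List Char) (h : ¬ pvSep <:+: l) :
    pvPieces l cur = [cur.reverse ++ l] := by
  induction l generalizing cur with
  | nil => rw [pvPieces]; simp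
  | cons c rest ih =>
    rw [pvPieces, if_neg, ih]
    · simp
    · intro hin; exact h (List.infix_cons hin)
    · intro hp
      exact h (List.isPrefixOf_iff_prefix.mp hp).isInfix

-- first occurrence at p → the first piece ends there
theorem pvPieces_occ (p : Nat) (l cur : List Char)
    (h1 : pvSep <+: l.drop p) (h2 : ∀ i < p, ¬ pvSep <+: l.drop i) :
    pvPieces l cur = (cur.reverse ++ l.take p) :: pvPieces (l.drop (p + 2)) [] := by
  induction p generalizing l cur with
  | zero =>
    simp only [List.drop_zero] at h1
    cases l with
    | nil =>
      have : pvSep = [] := List.prefix_nil.mp h1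
      simp [pvSep] at this
    | cons c rest =>
      rw [pvPieces, if_pos (List.isPrefixOf_iff_prefix.mpr h1)]
      simp
  | succ p ih =>
    have h0 : ¬ pvSep <+: l := by simpa using h2 0 (Nat.succ_pos p)
    cases l with
    | nil =>
      simp only [List.drop_nil] at h1
      have : pvSep = [] := List.prefix_nil.mp h1
      simp [pvSep] at this
    | cons c rest =>
      rw [pvPieces, if_neg (fun hp => h0 (List.isPrefixOf_iff_prefix.mp hp))]
      rw [ih rest (c :: cur) (by simpa using h1)
        (fun i hi => by simpa using h2 (i + 1) (by omega))]
      simp [List.append_assoc]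

-- the cumulative boundary offsets of the pieces are the find-based boundaries
theorem pvMidsC_pieces (l cur : List Char) (c : Int) :
    pvMidsC c (pvPieces l cur) = pvBnds l (c + cur.length) := by
  suffices H : ∀ n (l cur : List Char) (c : Int), l.length ≤ n →
      pvMidsC c (pvPieces l cur) = pvBnds l (c + cur.length) by
    exact H l.length l cur c le_rfl
  intro n
  induction n with
  | zero =>
    intro l cur c hn
    have hl : l = [] := List.length_eq_zero_iff.mp (Nat.le_zero.mp hn)
    subst hl
    rw [pvPieces, pvBnds, if_pos]
    · simp [pvMidsC]
    · rw [PySem.Chars.find_eq_neg_one_iff]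
      intro hin
      have := hin.length_le
      simp [pvSep] at this
  | succ n ih =>
    intro l cur c hn
    by_cases hf : PySem.Chars.find l pvSep = -1
    · rw [pvPieces_no_occ l cur ((PySem.Chars.find_eq_neg_one_iff l pvSep).mp hf)]
      rw [pvBnds, if_pos hf]
      simp [pvMidsC]
      ring
    · have h0 : 0 ≤ PySem.Chars.find l pvSep := by
        have := PySem.Chars.neg_one_le_find l pvSep; omega
      obtain ⟨hpre, hmin⟩ := PySem.Chars.find_spec h0
      set p := (PySem.Chars.find l pvSep).toNat with hp
      have hple : p + 2 ≤ l.length := by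
        have := hpre.length_le
        simp only [List.length_drop] at this
        have hsep : pvSep.length = 2 := rfl
        omega
      rw [pvPieces_occ p l cur hpre hmin]
      have hcast : PySem.Chars.find l pvSep = (p : Int) := by omega
      rw [pvBnds, if_neg hf, hcast]
      simp only [pvMidsC, List.length_append, List.length_reverse,
        List.length_take, Int.toNat_natCast]
      have htake : min p l.length = p := by omega
      rw [htake]
      have hrec := ih (l.drop (p + 2)) [] (c + ↑cur.length + ↑p + 2)
        (by simp; omega)
      simp only [List.length_nil, Nat.cast_zero, add_zero] at hrec
      have hc2 : (c + (↑(cur.length + p) : Int) + 2) = c + ↑cur.length + ↑p + 2 := by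
        push_cast; ring
      rw [hc2, hrec]

-- pvMids over strings is pvMidsC over their character lists
theorem pvMids_map_ofList (ps : List (List Char)) (c : Int) :
    pvMids c (ps.map String.ofList) = pvMidsC c ps := by
  induction ps generalizing c with
  | nil => rfl
  | cons x xs ih =>
    simp only [List.map_cons, pvMids, pvMidsC, PySem.Str.len_eq, String.toList_ofList]
    rw [ih]

-- boundary list facts
theorem pvBnds_lb (l : List Char) (base : Int) : ∀ x ∈ pvBnds l base, base < x := by
  induction l, base using pvBnds.induct with
  | case1 l base hf =>
    rw [pvBnds, if_pos hf]
    intro x hx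
    simp at hx
    omega
  | case2 l base hf ih =>
    have h0 : 0 ≤ PySem.Chars.find l pvSep := by
      have := PySem.Chars.neg_one_le_find l pvSep; omega
    rw [pvBnds, if_neg hf]
    intro x hx
    rcases List.mem_cons.mp hx with h | h
    · omega
    · have := ih x h
      omega

theorem pvBnds_pairwise (l : List Char) (base : Int) :
    (pvBnds l base).Pairwise (· < ·) := by
  induction l, base using pvBnds.induct with
  | case1 l base hf => rw [pvBnds, if_pos hf]; simp
  | case2 l base hf ih =>
    rw [pvBnds, if_neg hf]
    exact List.Pairwise.cons (pvBnds_lb _ _) ih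

theorem pvBnds_mem_last (l : List Char) (base : Int) :
    (base + l.length + 2) ∈ pvBnds l base := by
  induction l, base using pvBnds.induct with
  | case1 l base hf => rw [pvBnds, if_pos hf]; simp
  | case2 l base hf ih =>
    have h0 : 0 ≤ PySem.Chars.find l pvSep := by
      have := PySem.Chars.neg_one_le_find l pvSep; omega
    obtain ⟨hpre, -⟩ := PySem.Chars.find_spec h0
    have hple : (PySem.Chars.find l pvSep).toNat + 2 ≤ l.length := by
      have := hpre.length_le
      simp only [List.length_drop] at this
      have hsep : pvSep.length = 2 := rfl
      omega
    rw [pvBnds, if_neg hf]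
    apply List.mem_cons_of_mem
    have heq : base + PySem.Chars.find l pvSep + 2
        + (l.drop ((PySem.Chars.find l pvSep).toNat + 2)).length + 2
        = base + l.length + 2 := by
      simp only [List.length_drop]
      omega
    rw [← heq]
    exact ih

theorem pvBnds_length_le (l : List Char) (base : Int) :
    (pvBnds l base).length ≤ l.length + 1 := by
  induction l, base using pvBnds.induct with
  | case1 l base hf => rw [pvBnds, if_pos hf]; simp
  | case2 l base hf ih =>
    have h0 : 0 ≤ PySem.Chars.find l pvSep := by
      have := PySem.Chars.neg_one_le_find l pvSep; omega
    obtain ⟨hpre, -⟩ := PySem.Chars.find_spec h0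
    have hple : (PySem.Chars.find l pvSep).toNat + 2 ≤ l.length := by
      have := hpre.length_le
      simp only [List.length_drop] at this
      have hsep : pvSep.length = 2 := rfl
      omega
    rw [pvBnds, if_neg hf]
    simp only [List.length_cons]
    have := @List.length_drop _ ((PySem.Chars.find l pvSep).toNat + 2) l
    omega

-- once the best distance is never beaten, the fold keeps it
theorem pvFold_keep (t : Int) (xs : List Int) (d : Int) (q : Int)
    (h : ∀ x ∈ xs, ¬ (|x - t| < d)) :
    xs.foldl (pvBestStep t) (some (d, q)) = some (d, q) := by
  induction xs with
  | nil => rfl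
  | cons x xs ih =>
    rw [List.foldl_cons]
    have hx : pvBestStep t (some (d, q)) x = some (d, q) := by
      simp only [pvBestStep]
      rw [if_neg (h x (List.mem_cons_self))]
    rw [hx]
    exact ih (fun y hy => h y (List.mem_cons_of_mem _ hy))

-- on an increasing boundary list, B's early-exit selection is the argmin fold
theorem pvNsel_eq_fold_some (t : Int) (ms : List Int) (p : Int)
    (hp : p ≤ t) (hlt : ∀ x ∈ ms, p < x) (hpw : ms.Pairwise (· < ·))
    (hex : ∃ x ∈ ms, t < x) :
    pvNsel t (some p) ms = ((ms.foldl (pvBestStep t) (some (|p - t|, p))).map (fun b => b.2)).getD 0 := by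
  induction ms generalizing p with
  | nil => obtain ⟨x, hx, -⟩ := hex; simp at hx
  | cons b bs ih =>
    have hpb : p < b := hlt b List.mem_cons_self
    have habs_p : |p - t| = t - p := by rw [abs_of_nonpos (by omega)]; omega
    have hbs_gt : ∀ x ∈ bs, b < x := fun x hx => (List.pairwise_cons.mp hpw).1 x hx
    rw [pvNsel, List.foldl_cons]
    by_cases hb : t < b
    · rw [if_pos hb]
      have habs_b : |b - t| = b - t := by rw [abs_of_nonneg (by omega)]
      by_cases hsel : t - p ≤ b - t
      · rw [if_pos hsel]
        have hstep : pvBestStep t (some (|p - t|, p)) b = some (|p - t|, p) := by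
          simp only [pvBestStep]
          rw [if_neg (by rw [habs_b, habs_p]; omega)]
        rw [hstep, pvFold_keep]
        · simp
        · intro x hx
          have hbx := hbs_gt x hx
          have : |x - t| = x - t := by rw [abs_of_nonneg (by omega)]
          rw [this, habs_p]; omega
      · rw [if_neg hsel]
        have hstep : pvBestStep t (some (|p - t|, p)) b = some (|b - t|, b) := by
          simp only [pvBestStep]
          rw [if_pos (by rw [habs_b, habs_p]; omega)]
        rw [hstep, pvFold_keep]
        · simp
        · intro x hx
          have hbx := hbs_gt x hx
          have : |x - t| = x - t := by rw [abs_of_nonneg (by omega)]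
          rw [this, habs_b]; omega
    · rw [if_neg hb]
      rw [not_lt] at hb
      have habs_b : |b - t| = t - b := by rw [abs_of_nonpos (by omega)]; omega
      have hstep : pvBestStep t (some (|p - t|, p)) b = some (|b - t|, b) := by
        simp only [pvBestStep]
        rw [if_pos (by rw [habs_b, habs_p]; omega)]
      rw [hstep]
      have hex' : ∃ x ∈ bs, t < x := by
        obtain ⟨x, hx, htx⟩ := hex
        rcases List.mem_cons.mp hx with rfl | hx'
        · omega
        · exact ⟨x, hx', htx⟩
      exact ih b hb hbs_gt (List.pairwise_cons.mp hpw).2 hex'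

theorem pvNsel_eq_fold (t : Int) (ms : List Int)
    (hpw : ms.Pairwise (· < ·)) (hex : ∃ x ∈ ms, t < x) :
    pvNsel t none ms = ((ms.foldl (pvBestStep t) none).map (fun b => b.2)).getD 0 := by
  cases ms with
  | nil => obtain ⟨x, hx, -⟩ := hex; simp at hx
  | cons b bs =>
    have hbs_gt : ∀ x ∈ bs, b < x := fun x hx => (List.pairwise_cons.mp hpw).1 x hx
    rw [pvNsel, List.foldl_cons]
    have hstep : pvBestStep t none b = some (|b - t|, b) := rfl
    rw [hstep]
    by_cases hb : t < b
    · rw [if_pos hb]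
      have habs_b : |b - t| = b - t := by rw [abs_of_nonneg (by omega)]
      rw [pvFold_keep]
      · simp
      · intro x hx
        have hbx := hbs_gt x hx
        have : |x - t| = x - t := by rw [abs_of_nonneg (by omega)]
        rw [this, habs_b]; omega
    · rw [if_neg hb]
      rw [not_lt] at hb
      have hex' : ∃ x ∈ bs, t < x := by
        obtain ⟨x, hx, htx⟩ := hex
        rcases List.mem_cons.mp hx with rfl | hx'
        · omega
        · exact ⟨x, hx', htx⟩
      exact pvNsel_eq_fold_some t bs b hb hbs_gt (List.pairwise_cons.mp hpw).2 hex'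

-- B's find-walk computes pvNsel over the boundary list
theorem pvBFindLoop_eq_nsel (l : List Char) (t : Int) (fuel : Nat) (prev : Option Int)
    (i : Nat) (hi : i ≤ l.length) (ht : t < (l.length : Int) + 2)
    (hfuel : (pvBnds (l.drop i) (i : Int)).length ≤ fuel) :
    pvBFindLoop (String.ofList l) t fuel prev i = pvNsel t prev (pvBnds (l.drop i) (i : Int)) := by
  induction fuel generalizing prev i with
  | zero =>
    exfalso
    rw [pvBnds] at hfuel
    split_ifs at hfuel <;> simp at hfuel
  | succ fuel ih =>
    have hsep : ("\n\n" : String).toList = pvSep := rfl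
    have hJ : PySem.Str.findFrom (String.ofList l) "\n\n" (i : Int)
        = if PySem.Chars.find (l.drop i) pvSep = -1 then -1
          else (i : Int) + PySem.Chars.find (l.drop i) pvSep := by
      rw [PySem.Str.findFrom_eq, String.toList_ofList, hsep]
      exact PySem.Chars.findFrom_natCast l pvSep i hi
    have hlen : PySem.Str.len (String.ofList l) = (l.length : Int) := by
      rw [PySem.Str.len_eq, String.toList_ofList]
    have hunf : pvBFindLoop (String.ofList l) t (fuel+1) prev i =
        (let j := PySem.Str.findFrom (String.ofList l) "\n\n" (i : Int)
         let b : Int := if j ≠ -1 then j + 2 else PySem.Str.len (String.ofList l) + 2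
         if t < b then
           match prev with
           | none => b
           | some p => if t - p ≤ b - t then p else b
         else pvBFindLoop (String.ofList l) t fuel (some b) (j.toNat + 2)) := rfl
    rw [hunf]
    simp only [hJ, hlen]
    by_cases hf : PySem.Chars.find (l.drop i) pvSep = -1
    · rw [if_pos hf]
      have hb : (if ¬((-1 : Int) = -1) then (-1 : Int) + 2 else (l.length : Int) + 2)
          = (l.length : Int) + 2 := by simp
      have hbnds : pvBnds (l.drop i) (i : Int) = [(l.length : Int) + 2] := by
        have hdl : (l.drop i).length = l.length - i := List.length_drop
        rw [pvBnds, if_pos hf, hdl]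
        congr 1
        omega
      rw [hbnds, pvNsel_cons]
      simp only [hb]
      rw [if_pos ht]
      rw [if_pos ht]
    · have h0 : 0 ≤ PySem.Chars.find (l.drop i) pvSep := by
        have := PySem.Chars.neg_one_le_find (l.drop i) pvSep; omega
      set f := PySem.Chars.find (l.drop i) pvSep with hfdef
      obtain ⟨hpre, -⟩ := PySem.Chars.find_spec h0
      have hple : f.toNat + 2 ≤ (l.drop i).length := by
        have hsl2 : pvSep.length = 2 := rfl
        have h5 := hpre.length_le
        rw [hsl2] at h5
        simp only [List.length_drop] at h5 ⊢
        omega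
      rw [if_neg hf]
      have hjne : ¬((i : Int) + f = -1) := by omega
      have hb : (if ¬((i : Int) + f = -1) then (i : Int) + f + 2 else (l.length : Int) + 2)
          = (i : Int) + f + 2 := by rw [if_pos hjne]
      have hbnds : pvBnds (l.drop i) (i : Int)
          = ((i : Int) + f + 2) :: pvBnds ((l.drop i).drop (f.toNat + 2)) ((i : Int) + f + 2) := by
        rw [pvBnds, if_neg hf]
      rw [hbnds, pvNsel_cons]
      simp only [hb]
      by_cases htb : t < (i : Int) + f + 2
      · rw [if_pos htb, if_pos htb]
      · rw [if_neg htb, if_neg htb]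
        have hdl : (l.drop i).length = l.length - i := List.length_drop
        have hi' : i + f.toNat + 2 ≤ l.length := by
          simp only [hdl] at hple
          omega
        have htoNat : ((i : Int) + f).toNat + 2 = i + f.toNat + 2 := by omega
        have hdrop : l.drop (i + f.toNat + 2) = (l.drop i).drop (f.toNat + 2) := by
          rw [List.drop_drop, Nat.add_assoc]
        have hcast : ((i + f.toNat + 2 : Nat) : Int) = (i : Int) + f + 2 := by
          push_cast
          omega
        rw [htoNat, ih (some ((i : Int) + f + 2)) (i + f.toNat + 2) hi'
          (by rw [hdrop, hcast]
              rw [hbnds] at hfuel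
              simp only [List.length_cons] at hfuel
              omega)]
        rw [hdrop, hcast]

-- the paragraph list of A's port, in char-list form
theorem pvParagraphs_eq (text : String) :
    (PySem.Str.split? text "\n\n").getD [] = (pvPieces text.toList []).map String.ofList := by
  have hsep : ("\n\n" : String).toList = pvSep := rfl
  have h1 : PySem.Chars.split? text.toList pvSep
      = some (PySem.Chars.splitOn text.toList pvSep) := by
    rw [PySem.Chars.split?, if_neg (by simp [pvSep])]
  have h2 : PySem.Chars.splitOn text.toList pvSep = pvPieces text.toList [] := by
    rw [PySem.Chars.splitOn, pvGo_eq_pieces _ _ _ _ (Nat.lt_succ_self _)]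
    simp
  rw [PySem.Str.split?, hsep, h1, h2]
  rfl

-- the non-trivial (paragraph-aware) branches of the two ports agree
theorem pvMainBranch (text : String) :
    (let paragraphs := (PySem.Str.split? text "\n\n").getD []
     let st := paragraphs.foldl
       (fun (st : Int × List Int) p =>
         (st.1 + PySem.Str.len p + 2, st.2 ++ [st.1 + PySem.Str.len p + 2]))
       (0, [])
     let mids := st.2
     let target := PySem.Int.floordiv (PySem.Str.len text) 2
     let cutIdx := (PySem.List.min? (PySem.List.pyRange 0 (mids.length : Int) 1)
         (fun i => |PySem.List.pyGetD mids i 0 - target|)).getD 0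
     PySem.List.pyGetD mids cutIdx 0)
    = pvBFindLoop text (PySem.Int.floordiv (PySem.Str.len text) 2) (text.toList.length + 1) none 0 := by
  dsimp only
  have hmids : ((((PySem.Str.split? text "\n\n").getD []).foldl
       (fun (st : Int × List Int) p =>
         (st.1 + PySem.Str.len p + 2, st.2 ++ [st.1 + PySem.Str.len p + 2]))
       (0, [])).2 : List Int) = pvBnds text.toList 0 := by
    rw [pvParagraphs_eq, pvFoldA_eq]
    simp only [List.nil_append]
    rw [pvMids_map_ofList, pvMidsC_pieces]
    norm_num
  have ht2 : PySem.Int.floordiv (PySem.Str.len text) 2 < (text.toList.length : Int) + 2 := by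
    have hlen : PySem.Str.len text = (text.toList.length : Int) := PySem.Str.len_eq text
    rw [hlen, PySem.Int.floordiv_eq_ediv_of_pos (by norm_num)]
    omega
  have hex : ∃ x ∈ pvBnds text.toList 0, PySem.Int.floordiv (PySem.Str.len text) 2 < x := by
    refine ⟨(0 : Int) + text.toList.length + 2, pvBnds_mem_last text.toList 0, ?_⟩
    omega
  rw [hmids, ← pvCut_eq _ (pvBnds text.toList 0),
    ← pvNsel_eq_fold _ (pvBnds text.toList 0) (pvBnds_pairwise text.toList 0) hex]
  have := pvBFindLoop_eq_nsel text.toList (PySem.Int.floordiv (PySem.Str.len text) 2)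
    (text.toList.length + 1) none 0 (Nat.zero_le _) ht2
    (by simpa using pvBnds_length_le text.toList 0)
  rw [String.ofList_toList] at this
  rw [this]
  simp

-- ===== VERDICT (by name: the statement is the Claim_ definition above) =====
theorem two_balanced_chunks_py_spec : Claim_equal_two_balanced_chunks_py := by
  intro text _
  unfold Spec_two_balanced_chunks_py two_balanced_chunks_py two_balanced_chunks_py_alt
  by_cases h0 : text = ""
  · rw [if_pos h0, if_pos h0]
  · rw [if_neg h0, if_neg h0]
    by_cases h1 : PySem.Str.count text "\n\n" = 0 ∨ PySem.Str.len text < 400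
    · rw [if_pos h1, if_pos h1]
    · rw [if_neg h1, if_neg h1]
      have := pvMainBranch text
      dsimp only at this ⊢
      rw [this]
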